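-- pv_equiv track=rewrite | github.com/nermadie/CodeForces_Solutions | CodeforcesRound894Div3/prob01.py | vika_likes_carpet
-- ===== SOURCE A (Python) =====
-- def vika_likes_carpet(n, m, carpet):
--     name = "vika"
--     cur_char_index = 0
--     for j in range(m):
--         for i in range(n):
--             if carpet[i][j] == name[cur_char_index]:
--                 cur_char_index += 1
--                 break
--         if cur_char_index == 4:
--             return "YES"
--     return "NO"
-- ===== SOURCE B (Python) =====
-- def vika_likes_carpet(n, m, carpet):
--     # Build a per-letter index of the columns containing each letter of "vika",
--     # then match the word against the index, searching each letter's column list.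
--     occ = {ch: [j for j in range(m) if any(carpet[i][j] == ch for i in range(n))]
--            for ch in "vika"}
--     pos = 0
--     for ch in "vika":
--         nxt = next((c for c in occ[ch] if c >= pos), None)
--         if nxt is None:
--             return "NO"
--         pos = nxt + 1
--     return "YES"
-- ===== Notes on version B (the rewrite author's own statement) =====
-- stated objective: alternative
-- what changed: B first builds a per-letter index (dict) of the columns containing each letter of 'vika', then matches the word by searching each letter's column list for the first entry at or past the current position, so the matching phase never rescans the grid; A instead does one interleaved column-by-column grid scan with a letter counter.
-- outside the precondition, e.g. on vika_likes_carpet(2, 1, ['v', '']): A returns 'NO', B raises IndexError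
import Mathlib
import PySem

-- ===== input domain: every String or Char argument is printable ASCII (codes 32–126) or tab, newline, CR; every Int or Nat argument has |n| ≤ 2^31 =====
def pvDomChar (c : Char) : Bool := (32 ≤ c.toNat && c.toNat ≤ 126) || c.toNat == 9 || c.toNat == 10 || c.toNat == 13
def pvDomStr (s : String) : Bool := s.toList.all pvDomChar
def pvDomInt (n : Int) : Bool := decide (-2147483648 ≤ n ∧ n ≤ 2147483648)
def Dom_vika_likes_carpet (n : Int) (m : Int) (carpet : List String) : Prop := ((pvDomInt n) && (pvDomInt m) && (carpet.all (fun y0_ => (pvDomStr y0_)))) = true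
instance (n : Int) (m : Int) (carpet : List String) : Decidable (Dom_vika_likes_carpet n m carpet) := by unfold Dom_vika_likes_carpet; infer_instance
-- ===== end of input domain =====

-- B builds a per-letter index of columns containing each letter of "vika" and then matches the
-- word against that index; A does one interleaved grid scan. Alternative decomposition, same cost.

-- carpet[i][j] as a Char; the defaults are never reached inside Pre_ (Python raises there)
def pvCharAt (carpet : List String) (i : Int) (j : Int) : Char :=
  (PySem.Str.pyGet? ((PySem.List.pyGet? carpet i).getD "") j).getD ' '

-- ===== PORT A =====
-- inner 'for i in range(n): if carpet[i][j] == name[cur]: cur += 1; break' (counting loop, early break)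
def vikaRowsA (carpet : List String) (j : Int) (tgt : Char) (cur : Int) (n : Int) (i : Int) : Int :=
  if _h : i < n then
    if pvCharAt carpet i j == tgt then cur + 1
    else vikaRowsA carpet j tgt cur n (i + 1)
  else cur
termination_by (n - i).toNat
decreasing_by omega

-- outer 'for j in range(m)' with the cur_char_index accumulator and the early "YES" return
def vikaColsA (carpet : List String) (n : Int) (m : Int) (j : Int) (cur : Int) : String :=
  if _h : j < m then
    let cur' := vikaRowsA carpet j ((PySem.Str.pyGet? "vika" cur).getD ' ') cur n 0
    if cur' == 4 then "YES" else vikaColsA carpet n m (j + 1) cur'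
  else "NO"
termination_by (m - j).toNat
decreasing_by omega

def vika_likes_carpet (n : Int) (m : Int) (carpet : List String) : String :=
  vikaColsA carpet n m 0 0

-- ===== PORT B =====
-- 'any(carpet[i][j] == ch for i in range(n))' (short-circuiting generator)
def vikaAnyB (carpet : List String) (n : Int) (col : Int) (ch : Char) (i : Int) : Bool :=
  if _h : i < n then
    (pvCharAt carpet i col == ch) || vikaAnyB carpet n col ch (i + 1)
  else false
termination_by (n - i).toNat
decreasing_by omega

-- '[j for j in range(m) if any(...)]' — the column list of one letter
def occListB (carpet : List String) (n : Int) (m : Int) (ch : Char) : List Int :=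
  (PySem.List.pyRange 0 m 1).filter (fun j => vikaAnyB carpet n j ch 0)

-- the dict comprehension '{ch: [...] for ch in "vika"}'
def occDictB (carpet : List String) (n : Int) (m : Int) : PySem.Dict Char (List Int) :=
  "vika".toList.foldl (fun d ch => d.insert ch (occListB carpet n m ch)) PySem.Dict.empty

-- 'for ch in "vika": nxt = next((c for c in occ[ch] if c >= pos), None); …'
def matchLoopB (occ : PySem.Dict Char (List Int)) : List Char → Int → String
  | [], _ => "YES"
  | ch :: rest, pos =>
    match (occ.getD ch []).find? (fun c => decide (pos ≤ c)) with
    | none => "NO"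
    | some c => matchLoopB occ rest (c + 1)

def vika_likes_carpet_alt (n : Int) (m : Int) (carpet : List String) : String :=
  matchLoopB (occDictB carpet n m) "vika".toList 0

-- ===== PRECONDITION & SPEC =====
-- Pre_ excludes the inputs where Python raises IndexError (fewer than n rows, or an accessed
-- row shorter than m): it requires the whole n×m rectangle to be addressable, which also
-- excludes some ragged carpets on which A happens to return because its break skips the
-- out-of-range cells (B's full index-building pass raises there); see the cite.
def Pre_vika_likes_carpet (n : Int) (m : Int) (carpet : List String) : Prop :=
  0 < m → (n ≤ (carpet.length : Int) ∧ ∀ s ∈ carpet.take n.toNat, m ≤ (PySem.Str.len s))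
instance (n : Int) (m : Int) (carpet : List String) : Decidable (Pre_vika_likes_carpet n m carpet) := by
  unfold Pre_vika_likes_carpet; infer_instance

def pvWitness_vika_likes_carpet : Int × Int × List String := (1, 0, [])

def Spec_vika_likes_carpet (n : Int) (m : Int) (carpet : List String) (out : String) : Prop := out = vika_likes_carpet_alt n m carpet
instance (n : Int) (m : Int) (carpet : List String) (out : String) : Decidable (Spec_vika_likes_carpet n m carpet out) := by unfold Spec_vika_likes_carpet; infer_instance

-- ===== CLAIM (what is proved, stated in full; the proofs are below) =====
def Claim_equal_vika_likes_carpet : Prop := ∀ (n : Int) (m : Int) (carpet : List String), Dom_vika_likes_carpet n m carpet → Pre_vika_likes_carpet n m carpet → Spec_vika_likes_carpet n m carpet (vika_likes_carpet n m carpet)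

-- ===== LEMMAS AND PROOFS =====

-- Proof-only helpers: the greedy column pointer, as an explicit search, bridges A and B.
def vikaWhileB (carpet : List String) (n : Int) (m : Int) (ch : Char) (col : Int) : Option Int :=
  if _h : col < m then
    if vikaAnyB carpet n col ch 0 then some col
    else vikaWhileB carpet n m ch (col + 1)
  else none
termination_by (m - col).toNat
decreasing_by omega

def vikaLettersB (carpet : List String) (n : Int) (m : Int) : List Char → Int → String
  | [], _ => "YES"
  | ch :: rest, col =>
    match vikaWhileB carpet n m ch col with
    | none => "NO"
    | some c => vikaLettersB carpet n m rest (c + 1)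

-- A's inner row loop returns 'cur + 1' iff some row i..n-1 of the column holds the target
lemma vikaRowsA_eq (carpet : List String) (j : Int) (tgt : Char) (cur : Int) (n : Int) :
    ∀ k : Nat, ∀ i : Int, (n - i).toNat = k →
      vikaRowsA carpet j tgt cur n i = if vikaAnyB carpet n j tgt i then cur + 1 else cur := by
  intro k
  induction k using Nat.strong_induction_on with
  | _ k ih =>
    intro i hk
    rw [vikaRowsA, vikaAnyB]
    by_cases hin : i < n
    · simp only [hin, dite_true]
      by_cases hc : pvCharAt carpet i j == tgt
      · simp [hc]
      · simp only [hc, Bool.false_eq_true, ite_false, Bool.false_or]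
        exact ih ((n - (i + 1)).toNat) (by omega) (i + 1) rfl
    · simp [hin]

-- one column step of A's outer loop, with the target letter resolved to ch
lemma vika_one_col (carpet : List String) (n m col cur : Int) (ch : Char)
    (hcm : col < m) (htgt : (PySem.Str.pyGet? "vika" cur).getD ' ' = ch)
    (hcur : (cur == 4) = false) :
    vikaColsA carpet n m col cur =
      if vikaAnyB carpet n col ch 0 then
        (if cur + 1 == 4 then "YES" else vikaColsA carpet n m (col + 1) (cur + 1))
      else vikaColsA carpet n m (col + 1) cur := by
  rw [vikaColsA]
  simp only [hcm, dite_true, htgt, vikaRowsA_eq carpet col ch cur n (n - 0).toNat 0 rfl]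
  by_cases hany : vikaAnyB carpet n col ch 0 = true
  · simp only [hany, if_true]
  · simp only [hany, Bool.false_eq_true, ite_false, hcur]

-- one column step of the bridging greedy: advance the pointer, consuming the letter iff present
lemma vikaB_one_col (carpet : List String) (n m col : Int) (ch : Char) (rest : List Char)
    (hcm : col < m) :
    vikaLettersB carpet n m (ch :: rest) col =
      if vikaAnyB carpet n col ch 0 then
        vikaLettersB carpet n m rest (col + 1)
      else vikaLettersB carpet n m (ch :: rest) (col + 1) := by
  by_cases hany : vikaAnyB carpet n col ch 0 = true
  · rw [if_pos hany]
    conv_lhs => rw [vikaLettersB, vikaWhileB]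
    simp only [hcm, dite_true, hany, if_true]
  · rw [if_neg hany]
    conv_lhs => rw [vikaLettersB, vikaWhileB]
    simp only [hcm, dite_true, hany, Bool.false_eq_true, if_false]
    rw [vikaLettersB]

-- The invariant relating A's cur_char_index to the remaining letters of the bridging greedy
def vikaInv (cur : Int) (rest : List Char) : Prop :=
  (cur = 0 ∧ rest = ['v','i','k','a']) ∨ (cur = 1 ∧ rest = ['i','k','a']) ∨
  (cur = 2 ∧ rest = ['k','a']) ∨ (cur = 3 ∧ rest = ['a'])

lemma vika_main (carpet : List String) (n m : Int) :
    ∀ k : Nat, ∀ col : Int, (m - col).toNat = k →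
      ∀ cur : Int, ∀ rest : List Char, vikaInv cur rest →
        vikaColsA carpet n m col cur = vikaLettersB carpet n m rest col := by
  intro k
  induction k using Nat.strong_induction_on with
  | _ k ih =>
    intro col hk cur rest hinv
    by_cases hcm : col < m
    · rcases hinv with ⟨hc, hr⟩ | ⟨hc, hr⟩ | ⟨hc, hr⟩ | ⟨hc, hr⟩ <;> subst hc <;> subst hr <;>
        [ (rw [vika_one_col carpet n m col 0 'v' hcm (by decide) (by decide), vikaB_one_col carpet n m col 'v' _ hcm]);
          (rw [vika_one_col carpet n m col 1 'i' hcm (by decide) (by decide), vikaB_one_col carpet n m col 'i' _ hcm]);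
          (rw [vika_one_col carpet n m col 2 'k' hcm (by decide) (by decide), vikaB_one_col carpet n m col 'k' _ hcm]);
          (rw [vika_one_col carpet n m col 3 'a' hcm (by decide) (by decide), vikaB_one_col carpet n m col 'a' _ hcm])] <;>
      · split
        · norm_num
          first
            | exact ih ((m - (col + 1)).toNat) (by omega) (col + 1) (by omega) _ _
                (by unfold vikaInv; simp)
            | rw [vikaLettersB]
        · exact ih ((m - (col + 1)).toNat) (by omega) (col + 1) (by omega) _ _
            (by unfold vikaInv; simp)
    · rcases hinv with ⟨hc, hr⟩ | ⟨hc, hr⟩ | ⟨hc, hr⟩ | ⟨hc, hr⟩ <;> subst hr <;>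
        (rw [vikaColsA]; conv_rhs => rw [vikaLettersB, vikaWhileB]) <;> simp [hcm]

-- the greedy pointer never goes backwards
lemma vikaWhileB_ge (carpet : List String) (n m : Int) (ch : Char) :
    ∀ k : Nat, ∀ col c : Int, (m - col).toNat = k →
      vikaWhileB carpet n m ch col = some c → col ≤ c := by
  intro k
  induction k using Nat.strong_induction_on with
  | _ k ih =>
    intro col c hk h
    rw [vikaWhileB] at h
    by_cases hcm : col < m
    · simp only [hcm, dite_true] at h
      by_cases hany : vikaAnyB carpet n col ch 0 = true
      · simp only [hany, if_true, Option.some.injEq] at h; omega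
      · simp only [hany, Bool.false_eq_true, if_false] at h
        have := ih ((m - (col + 1)).toNat) (by omega) (col + 1) c rfl h
        omega
    · simp [hcm] at h

-- searching the filtered column list from col0 ≤ col equals the advancing while-pointer
lemma find_filter_eq_while (carpet : List String) (n m : Int) (ch : Char) :
    ∀ k : Nat, ∀ col : Int, (m - col).toNat = k → ∀ col0 : Int, col0 ≤ col →
      ((PySem.List.pyRange col m 1).filter (fun j => vikaAnyB carpet n j ch 0)).find?
          (fun c => decide (col0 ≤ c)) = vikaWhileB carpet n m ch col := by
  intro k
  induction k using Nat.strong_induction_on with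
  | _ k ih =>
    intro col hk col0 hle
    rw [vikaWhileB]
    by_cases hcm : col < m
    · rw [PySem.List.pyRange_one_cons hcm]
      simp only [hcm, dite_true, List.filter_cons]
      by_cases hany : vikaAnyB carpet n col ch 0 = true
      · have hd : decide (col0 ≤ col) = true := by simpa using hle
        simp only [hany, if_true, List.find?_cons, hd]
      · simp only [hany, Bool.false_eq_true, if_false]
        exact ih ((m - (col + 1)).toNat) (by omega) (col + 1) rfl col0 (by omega)
    · rw [PySem.List.pyRange_one_eq_nil (by omega)]
      simp [hcm]

-- searching the whole column list of a letter from position col equals the while-pointer at col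
lemma occ_find (carpet : List String) (n m : Int) (ch : Char) (col : Int) (h0 : 0 ≤ col) :
    (occListB carpet n m ch).find? (fun c => decide (col ≤ c)) = vikaWhileB carpet n m ch col := by
  unfold occListB
  by_cases hcm : col < m
  · rw [PySem.List.pyRange_one_append 0 col m h0 (by omega), List.filter_append,
      List.find?_append]
    have h1 : ((PySem.List.pyRange 0 col 1).filter
        (fun j => vikaAnyB carpet n j ch 0)).find? (fun c => decide (col ≤ c)) = none := by
      apply List.find?_eq_none.2
      intro x hx
      have := (PySem.List.mem_pyRange_one).1 (List.mem_of_mem_filter hx)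
      simp; omega
    rw [h1, Option.none_or]
    exact find_filter_eq_while carpet n m ch (m - col).toNat col rfl col le_rfl
  · rw [vikaWhileB]
    simp only [hcm, dite_false]
    apply List.find?_eq_none.2
    intro x hx
    have := (PySem.List.mem_pyRange_one).1 (List.mem_of_mem_filter hx)
    simp; omega

-- the dict comprehension looked up at each letter of "vika" gives that letter's column list
lemma occ_getD (carpet : List String) (n m : Int) (ch : Char) (hch : ch ∈ "vika".toList) :
    (occDictB carpet n m).getD ch [] = occListB carpet n m ch := by
  have hv : "vika".toList = ['v','i','k','a'] := by decide
  rw [hv] at hch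
  rcases List.mem_cons.1 hch with h | hch <;>
    [skip; rcases List.mem_cons.1 hch with h | hch] <;>
    [skip; skip; rcases List.mem_cons.1 hch with h | hch] <;>
    [skip; skip; skip; rcases List.mem_cons.1 hch with h | hch] <;>
    first
      | (subst h; simp [occDictB, hv, PySem.Dict.getD_insert])
      | simp at hch

-- B's matching loop over the index equals the bridging greedy
lemma matchLoop_eq (carpet : List String) (n m : Int) :
    ∀ rest : List Char, (∀ ch ∈ rest, ch ∈ "vika".toList) → ∀ col : Int, 0 ≤ col →
      matchLoopB (occDictB carpet n m) rest col = vikaLettersB carpet n m rest col := by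
  intro rest
  induction rest with
  | nil => intro _ col _; rfl
  | cons ch rest ihr =>
    intro hsub col h0
    rw [matchLoopB, vikaLettersB,
      occ_getD carpet n m ch (hsub ch (List.mem_cons_self)),
      occ_find carpet n m ch col h0]
    cases hw : vikaWhileB carpet n m ch col with
    | none => rfl
    | some c =>
      have hc := vikaWhileB_ge carpet n m ch (m - col).toNat col c rfl hw
      exact ihr (fun x hx => hsub x (List.mem_cons_of_mem _ hx)) (c + 1) (by omega)

-- ===== VERDICT (by name: the statement is the Claim_ definition above) =====
theorem vika_likes_carpet_spec : Claim_equal_vika_likes_carpet := by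
  intro n m carpet _ _
  unfold Spec_vika_likes_carpet vika_likes_carpet vika_likes_carpet_alt
  rw [matchLoop_eq carpet n m "vika".toList (fun _ h => h) 0 le_rfl]
  exact vika_main carpet n m (m - 0).toNat 0 rfl 0 _ (by unfold vikaInv; simp)
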